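-- pv_equiv track=rewrite | github.com/memoization-over-Recursion/Algorithms-and-data-structures | hasSquareOfZeros/hasSquareOfZerosDynamRec.py | preComputeNum
-- ===== SOURCE A (Python) =====
-- def preComputeNum(matrix):
--     infoMatrix = [[x for x  in y] for y in matrix]
--     length = len(matrix)
--     for row in range(length):
--         for col in range(length):
--             numOfZeros =  1 if matrix[row][col] == 0 else 0
--             infoMatrix[row][col] = {
--                 "zeroBelow" : numOfZeros,
--                 "zeroRight" : numOfZeros,
--             }
--     id = len(matrix) - 1
--     for row in reversed(range(length)):
--         for col in reversed(range(length)):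
--             if(matrix[row][col] == 1):
--                 continue
--             else:
--                 if(row < id):
--                     infoMatrix[row][col]["zeroBelow"] += infoMatrix[row+1][col]["zeroBelow"]
--                 if(col < id):
--                     infoMatrix[row][col]["zeroRight"] += infoMatrix[row][col+1]["zeroRight"]
--     return infoMatrix
-- ===== SOURCE B (Python) =====
-- def lineCounts(vals):
--     # Forward single pass: keep a running count c of zeros since the last 1 and,
--     # for each pending cell, the zero-count p seen before it; when a 1 closes the
--     # segment, each pending cell's answer is the closed form c - p.
--     out = []
--     pending = []  # prefix zero-counts of the cells of the open segment
--     c = 0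
--     for v in vals:
--         if v == 1:
--             out.extend(c - p for p in pending)
--             out.append(0)
--             pending = []
--             c = 0
--         else:
--             pending.append(c)
--             if v == 0:
--                 c += 1
--     out.extend(c - p for p in pending)
--     return out
--
--
-- def preComputeNum(matrix):
--     n = len(matrix)
--     if any(len(row) != n for row in matrix):
--         raise ValueError("preComputeNum expects a square matrix")
--     right = [lineCounts(row) for row in matrix]
--     below = [lineCounts(list(col)) for col in zip(*matrix)]
--     return [[{"zeroBelow": below[c][r], "zeroRight": right[r][c]}
--              for c in range(n)] for r in range(n)]
-- ===== Notes on version B (the rewrite author's own statement) =====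
-- stated objective: alternative
-- what changed: A fills a mutable grid of dicts and then runs a reverse double-loop suffix DP, mutating each dict with += from the neighbours below/right; B validates squareness, then makes one forward pass per line (each row, and each column of the zip-transpose) keeping a running zero count that resets at 1s, and gets each cell's answer as the closed form 'segment zero total minus zeros before the cell', assembling the dicts once.
-- outside the precondition, e.g. on preComputeNum([[1, 0]]): A returns [[{'zeroBelow': 0, 'zeroRight': 0}, 0]], B raises ValueError
import Mathlib
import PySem

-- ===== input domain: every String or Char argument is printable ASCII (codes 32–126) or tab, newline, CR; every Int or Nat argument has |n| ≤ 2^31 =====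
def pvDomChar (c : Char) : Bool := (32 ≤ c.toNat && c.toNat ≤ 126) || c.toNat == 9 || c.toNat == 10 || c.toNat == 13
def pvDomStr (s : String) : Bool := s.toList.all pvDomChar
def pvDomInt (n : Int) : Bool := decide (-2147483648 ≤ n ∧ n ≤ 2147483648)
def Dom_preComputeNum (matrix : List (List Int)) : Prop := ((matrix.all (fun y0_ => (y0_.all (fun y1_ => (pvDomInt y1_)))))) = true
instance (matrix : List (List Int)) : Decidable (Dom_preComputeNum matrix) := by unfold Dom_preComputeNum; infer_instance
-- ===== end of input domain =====

-- B replaces A's reverse double-loop suffix DP over a mutable grid of dicts by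
-- forward single passes per row and per transposed column (a running zero count
-- that resets at 1s), reading each cell's answer off the closed form
-- "segment zero total minus zeros before the cell"; B validates squareness
-- (ValueError on ragged input, which Pre_ excludes).

-- ===== PORT A =====
-- shared dict primitives for the two-key cells {"zeroBelow": _, "zeroRight": _}
-- d[k] on an association list with distinct keys (exact: first match)
def pvDictGet (cell : List (String × Int)) (k : String) : Int :=
  ((cell.find? (fun p => p.1 == k)).map (·.2)).getD 0
-- d[k] += v : overwrite in place, keeping the key's position (exact for distinct keys)
def pvDictAdd (cell : List (String × Int)) (k : String) (d : Int) : List (String × Int) :=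
  cell.map (fun p => if p.1 == k then (p.1, p.2 + d) else p)
-- matrix[r][c]; loop indices are in range under Pre_, so the default is never taken
def pvMget (matrix : List (List Int)) (r c : Nat) : Int := (matrix.getD r []).getD c 0
-- A's first double loop: it overwrites EVERY cell of the length×length grid with a
-- fresh dict, so the heterogeneous copy-then-assign is ported as direct construction
-- of the fully assigned grid (exact under Pre_, where the shape is square).
def pvGrid0 (matrix : List (List Int)) : List (List (List (String × Int))) :=
  (List.range matrix.length).map (fun row =>
    (List.range matrix.length).map (fun col =>
      let numOfZeros : Int := if pvMget matrix row col = 0 then 1 else 0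
      [("zeroBelow", numOfZeros), ("zeroRight", numOfZeros)]))
def pvAGet (g : List (List (List (String × Int)))) (r c : Nat) : List (String × Int) :=
  (g.getD r []).getD c []
def pvASet (g : List (List (List (String × Int)))) (r c : Nat) (x : List (String × Int)) :
    List (List (List (String × Int))) :=
  g.set r ((g.getD r []).set c x)
-- body of A's second (reversed) double loop
def pvUpdA (matrix : List (List Int)) (id r c : Nat) (g : List (List (List (String × Int)))) :
    List (List (List (String × Int))) :=
  if pvMget matrix r c = 1 then g
  else
    let g1 := if r < id then
        pvASet g r c (pvDictAdd (pvAGet g r c) "zeroBelow" (pvDictGet (pvAGet g (r+1) c) "zeroBelow"))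
      else g
    if c < id then
        pvASet g1 r c (pvDictAdd (pvAGet g1 r c) "zeroRight" (pvDictGet (pvAGet g1 r (c+1)) "zeroRight"))
      else g1
def preComputeNum (matrix : List (List Int)) : List (List (List (String × Int))) :=
  let length := matrix.length
  let infoMatrix := pvGrid0 matrix
  let id := length - 1
  (List.range length).reverse.foldl (fun g row =>
    (List.range length).reverse.foldl (fun g col => pvUpdA matrix id row col g) g) infoMatrix

-- ===== PORT B =====
-- loop body of lineCounts: state (out, pending, c); at a 1 flush the open segment
-- with the closed form c - p and reset, otherwise record the prefix count
def pvLineStep (st : List Int × List Int × Int) (v : Int) : List Int × List Int × Int :=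
  if v = 1 then (st.1 ++ st.2.1.map (fun p => st.2.2 - p) ++ [0], [], 0)
  else (st.1, st.2.1 ++ [st.2.2], if v = 0 then st.2.2 + 1 else st.2.2)
-- final flush after the loop
def pvLineFin (st : List Int × List Int × Int) : List Int :=
  st.1 ++ st.2.1.map (fun p => st.2.2 - p)
def pvLineCounts (vals : List Int) : List Int :=
  pvLineFin (vals.foldl pvLineStep ([], [], 0))
-- B's square-shape guard raises ValueError on ragged input, which Pre_ excludes; on
-- the admitted (square) inputs it passes, so the port computes the main path.
-- zip(*matrix) is ported column by column (exact for the square inputs admitted here).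
def preComputeNum_alt (matrix : List (List Int)) : List (List (List (String × Int))) :=
  let n := matrix.length
  let right := matrix.map pvLineCounts
  let cols := (List.range n).map (fun c => matrix.map (fun row => row.getD c 0))
  let below := cols.map pvLineCounts
  (List.range n).map (fun r => (List.range n).map (fun c =>
    [("zeroBelow", (below.getD c []).getD r 0), ("zeroRight", (right.getD r []).getD c 0)]))

-- ===== PRECONDITION & SPEC =====
-- Pre_ excludes ragged inputs: rows shorter than len(matrix) make A raise IndexError,
-- and on rows longer than len(matrix) A returns lists still containing raw ints past
-- column len(matrix)-1 — not values of the declared list-of-dict-rows return type, so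
-- they cannot be stated here at all; B raises ValueError on every ragged input.
def Pre_preComputeNum (matrix : List (List Int)) : Prop :=
  ∀ row ∈ matrix, row.length = matrix.length
instance (matrix : List (List Int)) : Decidable (Pre_preComputeNum matrix) := by
  unfold Pre_preComputeNum; infer_instance
def pvWitness_preComputeNum : List (List Int) := [[0, 1], [1, 0]]
def Spec_preComputeNum (matrix : List (List Int)) (out : List (List (List (String × Int)))) : Prop := out = preComputeNum_alt matrix
instance (matrix : List (List Int)) (out : List (List (List (String × Int)))) : Decidable (Spec_preComputeNum matrix out) := by unfold Spec_preComputeNum; infer_instance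

-- ===== CLAIM (what is proved, stated in full; the proofs are below) =====
def Claim_equal_preComputeNum : Prop := ∀ (matrix : List (List Int)), Dom_preComputeNum matrix → Pre_preComputeNum matrix → Spec_preComputeNum matrix (preComputeNum matrix)

-- ===== LEMMAS AND PROOFS =====

-- proof-only intermediate: the suffix recurrence both programs compute, as a list
def pvZlist : List Int → List Int
  | [] => []
  | v :: rest =>
    ((if v = 0 then 1 else 0) + (if v ≠ 1 then (pvZlist rest).headD 0 else 0)) :: pvZlist rest

theorem pvZlist_length (vals : List Int) : (pvZlist vals).length = vals.length := by
  induction vals with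
  | nil => rfl
  | cons v rest ih => simp [pvZlist, ih]

-- B's fold invariant: running the loop from state (out, pending, c) appends the
-- closed-form answers of the pending cells followed by pvZlist of the rest
theorem pvLineInv (vals : List Int) : ∀ (out pending : List Int) (c : Int),
    pvLineFin (vals.foldl pvLineStep (out, pending, c))
      = out ++ pending.map (fun p => (c + (pvZlist vals).headD 0) - p) ++ pvZlist vals := by
  induction vals with
  | nil => intro out pending c; simp [pvLineFin, pvZlist]
  | cons v rest ih =>
    intro out pending c
    by_cases hv : v = 1
    · rw [List.foldl_cons]
      have hstep : pvLineStep (out, pending, c) v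
          = (out ++ pending.map (fun p => c - p) ++ [0], [], 0) := by
        simp [pvLineStep, hv]
      rw [hstep, ih]
      simp [pvZlist, hv]
    · rw [List.foldl_cons]
      have hstep : pvLineStep (out, pending, c) v
          = (out, pending ++ [c], if v = 0 then c + 1 else c) := by
        simp [pvLineStep, hv]
      rw [hstep, ih]
      have hb : (if v = 0 then c + 1 else c) = c + (if v = 0 then (1:Int) else 0) := by
        by_cases h0 : v = 0 <;> simp [h0]
      have hfun : (fun p => c + (if v = 0 then (1:Int) else 0) + (pvZlist rest).headD 0 - p)
          = (fun p => c + ((if v = 0 then (1:Int) else 0) + (pvZlist rest).headD 0) - p) := by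
        funext p; ring
      have hx : c + ((if v = 0 then (1:Int) else 0) + (pvZlist rest).headD 0) - c
          = (if v = 0 then (1:Int) else 0) + (pvZlist rest).headD 0 := by ring
      simp only [pvZlist, hv, ne_eq, not_false_eq_true, if_true, List.headD_cons,
        List.map_append, List.map_cons, List.map_nil, List.append_assoc, hb, hfun, hx,
        List.singleton_append]

theorem pvLineCounts_eq (vals : List Int) : pvLineCounts vals = pvZlist vals := by
  have h := pvLineInv vals [] [] 0
  simpa [pvLineCounts] using h

-- the pointwise recurrence satisfied by pvZlist (0 past the end via getD)
theorem pvZlist_getD (vals : List Int) : ∀ (k : Nat), k < vals.length →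
    (pvZlist vals).getD k 0
      = (if vals.getD k 0 = 0 then 1 else 0)
        + (if vals.getD k 0 ≠ 1 then (pvZlist vals).getD (k+1) 0 else 0) := by
  induction vals with
  | nil => intro k hk; simp at hk
  | cons v rest ih =>
    intro k hk
    cases k with
    | zero =>
      have hhead : (pvZlist (v :: rest)).getD 1 0 = (pvZlist rest).headD 0 := by
        cases h : pvZlist rest with
        | nil => simp [pvZlist, h]
        | cons a t => simp [pvZlist, h]
      simp only [pvZlist, List.getD_cons_zero, List.getD_cons_succ] at hhead ⊢
      rw [← hhead]
    | succ k' =>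
      simp only [pvZlist, List.getD_cons_succ]
      exact ih k' (by simpa using hk)

theorem pvZlist_getD_len (vals : List Int) (k : Nat) (hk : vals.length ≤ k) :
    (pvZlist vals).getD k 0 = 0 := by
  rw [List.getD_eq_getElem?_getD, List.getElem?_eq_none (by rw [pvZlist_length]; omega)]
  rfl

-- the common spec: truncated row/column lines and the per-cell answers
def pvRowT (matrix : List (List Int)) (r : Nat) : List Int :=
  (List.range matrix.length).map (fun c => pvMget matrix r c)
def pvColT (matrix : List (List Int)) (c : Nat) : List Int :=
  (List.range matrix.length).map (fun r => pvMget matrix r c)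
def pvZB (matrix : List (List Int)) (r c : Nat) : Int := (pvZlist (pvColT matrix c)).getD r 0
def pvZR (matrix : List (List Int)) (r c : Nat) : Int := (pvZlist (pvRowT matrix r)).getD c 0
def pvSpecCell (matrix : List (List Int)) (r c : Nat) : List (String × Int) :=
  [("zeroBelow", pvZB matrix r c), ("zeroRight", pvZR matrix r c)]
def pvSpecRow (matrix : List (List Int)) (r : Nat) : List (List (String × Int)) :=
  (List.range matrix.length).map (fun c => pvSpecCell matrix r c)

theorem pvRowT_getD (matrix : List (List Int)) (r c : Nat) (hc : c < matrix.length) :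
    (pvRowT matrix r).getD c 0 = pvMget matrix r c := by
  rw [pvRowT, PySem.List.getD_map_range _ _ _ _ hc]
theorem pvColT_getD (matrix : List (List Int)) (r c : Nat) (hr : r < matrix.length) :
    (pvColT matrix c).getD r 0 = pvMget matrix r c := by
  rw [pvColT, PySem.List.getD_map_range _ _ _ _ hr]
theorem pvRowT_length (matrix : List (List Int)) (r : Nat) :
    (pvRowT matrix r).length = matrix.length := by simp [pvRowT]
theorem pvColT_length (matrix : List (List Int)) (c : Nat) :
    (pvColT matrix c).length = matrix.length := by simp [pvColT]

-- ===== the old reverse-DP shape of A, proof-only, and A = that shape =====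
def pvColsB (vals : List Int) (below : Option (List (List (String × Int)))) :
    Nat → Option Int → List (List (String × Int)) → List (List (String × Int))
  | 0, _, acc => acc
  | c+1, rzr, acc =>
    let v := vals.getD c 0
    let base : Int := if v = 0 then 1 else 0
    let zb := if v ≠ 1 then
        base + (match below with | some bl => pvDictGet (bl.getD c []) "zeroBelow" | none => 0)
      else base
    let zr := if v ≠ 1 then
        base + (match rzr with | some x => x | none => 0)
      else base
    pvColsB vals below c (some zr) ([("zeroBelow", zb), ("zeroRight", zr)] :: acc)
def pvRowsB (matrix : List (List Int)) (n : Nat) :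
    Nat → Option (List (List (String × Int))) → List (List (List (String × Int))) →
    List (List (List (String × Int)))
  | 0, _, acc => acc
  | r+1, below, acc =>
    let cells := pvColsB (matrix.getD r []) below n none []
    pvRowsB matrix n r (some cells) (cells :: acc)

-- the base row A's first pass assigns for a row with values `vals`
def pvBaseRowOf (vals : List Int) (n : Nat) : List (List (String × Int)) :=
  (List.range n).map (fun c =>
    let b : Int := if vals.getD c 0 = 0 then 1 else 0
    [("zeroBelow", b), ("zeroRight", b)])

theorem pvGrid0_eq (matrix : List (List Int)) :
    pvGrid0 matrix = (List.range matrix.length).map (fun r => pvBaseRowOf (matrix.getD r []) matrix.length) := rfl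

theorem pvSetGetD {α : Type} (g : List α) (r : Nat) (d : α) (h : r < g.length) :
    g.set r (g.getD r d) = g := by
  rw [List.getD_eq_getElem g d h]; exact List.set_getElem_self h

theorem pvGetDTakeAppend {α : Type} (xs acc : List α) (c : Nat) (d : α) (h : c < xs.length) :
    ((xs.take (c+1)) ++ acc).getD c d = xs.getD c d := by
  rw [List.getD_eq_getElem _ d (by simp; omega), List.getD_eq_getElem xs d h,
      List.getElem_append_left (by simp; omega)]
  exact List.getElem_take

theorem pvSetTakeAppend {α : Type} (xs acc : List α) (c : Nat) (y : α) (h : c < xs.length) :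
    ((xs.take (c+1)) ++ acc).set c y = xs.take c ++ y :: acc := by
  have h1 : (List.take (c+1) xs).set c y = List.take c xs ++ [y] := by
    rw [List.take_add_one, List.getElem?_eq_getElem h, Option.toList_some,
        List.set_append, if_neg (by simp [Nat.min_eq_left h.le])]
    simp [Nat.min_eq_left h.le]
  rw [List.set_append, if_pos (by simp; omega), h1]
  simp

theorem pvGetDTakeAppendRight {α : Type} (xs acc : List α) (c : Nat) (d : α) (h : c + 1 ≤ xs.length) :
    ((xs.take (c+1)) ++ acc).getD (c+1) d = acc.getD 0 d := by
  have hl : (List.take (c+1) xs).length = c + 1 := by simp; omega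
  rw [List.getD_eq_getElem?_getD, List.getElem?_append_right (by omega), hl]
  simp [List.getD_eq_getElem?_getD]

theorem pvGetDSetSucc {α : Type} (g : List α) (r : Nat) (x : α) (d : α) :
    (g.set r x).getD (r+1) d = g.getD (r+1) d := by
  simp [List.getD_eq_getElem?_getD, List.getElem?_set_ne (by omega : r ≠ r+1)]

-- B's cell and its zeroRight value for column c (names for the lets in pvColsB)
def pvZbV (vals : List Int) (below : Option (List (List (String × Int)))) (c : Nat) : Int :=
  if vals.getD c 0 ≠ 1 then
    (if vals.getD c 0 = 0 then 1 else 0)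
      + (match below with | some bl => pvDictGet (bl.getD c []) "zeroBelow" | none => 0)
  else (if vals.getD c 0 = 0 then 1 else 0)
def pvZrV (vals : List Int) (c : Nat) (rzr : Option Int) : Int :=
  if vals.getD c 0 ≠ 1 then
    (if vals.getD c 0 = 0 then 1 else 0) + (match rzr with | some x => x | none => 0)
  else (if vals.getD c 0 = 0 then 1 else 0)
def pvCellV (vals : List Int) (below : Option (List (List (String × Int)))) (c : Nat)
    (rzr : Option Int) : List (String × Int) :=
  [("zeroBelow", pvZbV vals below c), ("zeroRight", pvZrV vals c rzr)]

theorem pvColsB_succ (vals : List Int) (below : Option (List (List (String × Int))))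
    (c : Nat) (rzr : Option Int) (acc : List (List (String × Int))) :
    pvColsB vals below (c+1) rzr acc
      = pvColsB vals below c (some (pvZrV vals c rzr)) (pvCellV vals below c rzr :: acc) := rfl

theorem pvDictAddBelow (a b d : Int) :
    pvDictAdd [("zeroBelow", a), ("zeroRight", b)] "zeroBelow" d
      = [("zeroBelow", a + d), ("zeroRight", b)] := by simp [pvDictAdd]

theorem pvDictAddRight (a b d : Int) :
    pvDictAdd [("zeroBelow", a), ("zeroRight", b)] "zeroRight" d
      = [("zeroBelow", a), ("zeroRight", b + d)] := by simp [pvDictAdd]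

theorem pvDictGetRight (a b : Int) :
    pvDictGet [("zeroBelow", a), ("zeroRight", b)] "zeroRight" = b := by
  simp [pvDictGet, List.find?]

theorem pvDictGetBelow (a b : Int) :
    pvDictGet [("zeroBelow", a), ("zeroRight", b)] "zeroBelow" = a := by
  simp [pvDictGet, List.find?]

theorem pvGetDAt {α : Type} (l1 acc : List α) (y d : α) (c : Nat) (h : l1.length = c) :
    (l1 ++ y :: acc).getD c d = y := by
  rw [List.getD_eq_getElem?_getD, List.getElem?_append_right (by omega), h]
  simp

theorem pvGetDAtSucc {α : Type} (l1 acc : List α) (y d : α) (c : Nat) (h : l1.length = c) :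
    (l1 ++ y :: acc).getD (c+1) d = acc.getD 0 d := by
  rw [List.getD_eq_getElem?_getD, List.getElem?_append_right (by omega), h]
  simp [List.getD_eq_getElem?_getD]

theorem pvSetAt {α : Type} (l1 acc : List α) (y z : α) (c : Nat) (h : l1.length = c) :
    (l1 ++ y :: acc).set c z = l1 ++ z :: acc := by
  rw [List.set_append, if_neg (by omega), h]
  simp

theorem pvGetDSetSelf {α : Type} (g : List α) (r : Nat) (x d : α) (h : r < g.length) :
    (g.set r x).getD r d = x := by
  rw [List.getD_eq_getElem?_getD, List.getElem?_set_self (by simpa using h)]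
  simp

theorem pvTakeSuccAppend {α : Type} (xs acc : List α) (c : Nat) (d : α) (h : c < xs.length) :
    xs.take (c+1) ++ acc = xs.take c ++ xs.getD c d :: acc := by
  conv_lhs => rw [List.take_add_one, List.getElem?_eq_getElem h, Option.toList_some]
  rw [List.getD_eq_getElem xs d h, List.append_assoc]
  rfl

-- one step of A's inner loop equals prepending the recurrence cell for column c
theorem pvStepA (matrix : List (List Int)) (vals : List Int) (r c : Nat)
    (g : List (List (List (String × Int)))) (acc : List (List (String × Int)))
    (below : Option (List (List (String × Int)))) (rzr : Option Int)
    (hvals : matrix.getD r [] = vals)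
    (hc1 : c < matrix.length)
    (hr : r < g.length)
    (hrow : g.getD r [] = (pvBaseRowOf vals matrix.length).take (c+1) ++ acc)
    (hacc : acc.length = matrix.length - (c+1))
    (hrzr : rzr = acc.head?.map (fun cell => pvDictGet cell "zeroRight"))
    (hbelow : match below with
      | some bl => r < matrix.length - 1 ∧ g.getD (r+1) [] = bl
      | none => ¬ r < matrix.length - 1) :
    pvUpdA matrix (matrix.length - 1) r c g
      = g.set r ((pvBaseRowOf vals matrix.length).take c ++ pvCellV vals below c rzr :: acc) := by
  have hmv : pvMget matrix r c = vals.getD c 0 := by rw [pvMget, hvals]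
  have hbslen : (pvBaseRowOf vals matrix.length).length = matrix.length := by simp [pvBaseRowOf]
  have hbsc : (pvBaseRowOf vals matrix.length).getD c [] =
      [("zeroBelow", if vals.getD c 0 = 0 then (1:Int) else 0),
       ("zeroRight", if vals.getD c 0 = 0 then (1:Int) else 0)] := by
    rw [pvBaseRowOf, PySem.List.getD_map_range _ _ _ _ hc1]
  have htc : ((pvBaseRowOf vals matrix.length).take c).length = c := by
    simp [hbslen]; omega
  have hrow' : g.getD r [] =
      (pvBaseRowOf vals matrix.length).take c ++ (pvBaseRowOf vals matrix.length).getD c [] :: acc := by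
    rw [hrow, pvTakeSuccAppend _ _ _ _ (by omega : c < (pvBaseRowOf vals matrix.length).length)]
  rw [pvUpdA, hmv]
  by_cases hv1 : vals.getD c 0 = 1
  · rw [if_pos hv1]
    have hcell : pvCellV vals below c rzr = (pvBaseRowOf vals matrix.length).getD c [] := by
      rw [hbsc, pvCellV, pvZbV.eq_def, pvZrV.eq_def, hv1]
      simp
    rw [hcell, ← hrow', pvSetGetD _ _ _ hr]
  · rw [if_neg hv1]
    have hG1 : (if r < matrix.length - 1 then
          pvASet g r c (pvDictAdd (pvAGet g r c) "zeroBelow"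
            (pvDictGet (pvAGet g (r+1) c) "zeroBelow"))
        else g)
        = g.set r ((pvBaseRowOf vals matrix.length).take c ++
            [("zeroBelow", pvZbV vals below c),
             ("zeroRight", if vals.getD c 0 = 0 then (1:Int) else 0)] :: acc) := by
      rcases below with _ | bl
      · have hnb : ¬ r < matrix.length - 1 := hbelow
        rw [if_neg hnb]
        have : pvZbV vals none c = (if vals.getD c 0 = 0 then (1:Int) else 0) := by
          rw [pvZbV.eq_def, if_pos hv1]
          simp
        rw [this, ← hbsc, ← hrow', pvSetGetD _ _ _ hr]
      · obtain ⟨hrlt, hgbl⟩ := hbelow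
        rw [if_pos hrlt]
        have hgetc : pvAGet g r c = (pvBaseRowOf vals matrix.length).getD c [] := by
          rw [pvAGet, hrow', pvGetDAt _ _ _ _ _ htc]
        have hgetb : pvAGet g (r+1) c = bl.getD c [] := by rw [pvAGet, hgbl]
        rw [pvASet, hgetc, hgetb, hbsc, hrow']
        congr 1
        rw [pvSetAt _ _ _ _ _ htc, pvDictAddBelow]
        congr 3
        rw [pvZbV.eq_def, if_pos hv1]
    rw [hG1]
    have hG1row : (g.set r ((pvBaseRowOf vals matrix.length).take c ++
        [("zeroBelow", pvZbV vals below c),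
         ("zeroRight", if vals.getD c 0 = 0 then (1:Int) else 0)] :: acc)).getD r []
        = (pvBaseRowOf vals matrix.length).take c ++
          [("zeroBelow", pvZbV vals below c),
           ("zeroRight", if vals.getD c 0 = 0 then (1:Int) else 0)] :: acc :=
      pvGetDSetSelf _ _ _ _ hr
    by_cases hcid : c < matrix.length - 1
    · rw [if_pos hcid]
      obtain ⟨a0, acc', rfl⟩ : ∃ a0 acc', acc = a0 :: acc' := by
        cases acc with
        | nil => simp at hacc; omega
        | cons a0 acc' => exact ⟨a0, acc', rfl⟩
      have hz : pvZrV vals c rzr =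
          (if vals.getD c 0 = 0 then (1:Int) else 0) + pvDictGet a0 "zeroRight" := by
        simp only [List.head?_cons, Option.map_some] at hrzr
        rw [pvZrV.eq_def, if_pos hv1, hrzr]
      rw [pvASet, pvAGet, pvAGet, hG1row, pvGetDAt _ _ _ _ _ htc, pvGetDAtSucc _ _ _ _ _ htc,
          List.getD_cons_zero, pvDictAddRight, List.set_set, pvSetAt _ _ _ _ _ htc, pvCellV, hz]
    · rw [if_neg hcid]
      have haccnil : acc = [] := by
        cases acc with
        | nil => rfl
        | cons a0 acc' => exfalso; simp at hacc; omega
      subst haccnil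
      simp only [List.head?_nil, Option.map_none] at hrzr
      have : pvCellV vals below c rzr =
          [("zeroBelow", pvZbV vals below c),
           ("zeroRight", if vals.getD c 0 = 0 then (1:Int) else 0)] := by
        rw [pvCellV, pvZrV.eq_def, if_pos hv1, hrzr]
        simp
      rw [this]

-- inner-loop invariant: A's reversed column loop on row r, with the columns ≥ c already
-- finalised (= acc) and the row below already final, computes pvColsB
theorem pvInner (matrix : List (List Int)) (vals : List Int) (r : Nat)
    (hvals : matrix.getD r [] = vals)
    (below : Option (List (List (String × Int)))) :
    ∀ (c : Nat) (g : List (List (List (String × Int))))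
      (acc : List (List (String × Int))) (rzr : Option Int),
    c ≤ matrix.length →
    r < g.length →
    g.getD r [] = (pvBaseRowOf vals matrix.length).take c ++ acc →
    acc.length = matrix.length - c →
    rzr = acc.head?.map (fun cell => pvDictGet cell "zeroRight") →
    (match below with
     | some bl => r < matrix.length - 1 ∧ g.getD (r+1) [] = bl
     | none => ¬ r < matrix.length - 1) →
    (List.range c).reverse.foldl (fun g col => pvUpdA matrix (matrix.length - 1) r col g) g
      = g.set r (pvColsB vals below c rzr acc) := by
  intro c
  induction c with
  | zero =>
    intro g acc rzr _ hr hrow hacc hrzr hbelow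
    simp only [List.range_zero, List.reverse_nil, List.foldl_nil, pvColsB]
    rw [List.take_zero, List.nil_append] at hrow
    rw [← hrow, pvSetGetD _ _ _ hr]
  | succ c ih =>
    intro g acc rzr hc hr hrow hacc hrzr hbelow
    have hc1 : c < matrix.length := by omega
    rw [List.range_succ, List.reverse_append, List.reverse_singleton, List.singleton_append,
        List.foldl_cons, pvColsB_succ]
    rw [pvStepA matrix vals r c g acc below rzr hvals hc1 hr hrow hacc hrzr hbelow]
    have hr' : r < ((g.set r ((pvBaseRowOf vals matrix.length).take c ++
        pvCellV vals below c rzr :: acc))).length := by simpa using hr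
    rw [ih (g.set r ((pvBaseRowOf vals matrix.length).take c ++ pvCellV vals below c rzr :: acc))
        (pvCellV vals below c rzr :: acc) (some (pvZrV vals c rzr))
        (by omega) hr'
        (pvGetDSetSelf _ _ _ _ hr)
        (by simp; omega)
        (by simp only [List.head?_cons, Option.map_some, pvCellV, pvDictGetRight])
        (by
          rcases below with _ | bl
          · exact hbelow
          · obtain ⟨h1, h2⟩ := hbelow
            exact ⟨h1, by rw [pvGetDSetSucc, h2]⟩),
        List.set_set]

-- outer-loop invariant: rows ≥ r already final (= acc), rows < r still base
theorem pvOuter (matrix : List (List Int)) :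
    ∀ (r : Nat) (g : List (List (List (String × Int))))
      (acc : List (List (List (String × Int)))),
    r ≤ matrix.length →
    g.length = matrix.length →
    g = (pvGrid0 matrix).take r ++ acc →
    acc.length = matrix.length - r →
    (List.range r).reverse.foldl (fun g row =>
        (List.range matrix.length).reverse.foldl
          (fun g col => pvUpdA matrix (matrix.length - 1) row col g) g) g
      = pvRowsB matrix matrix.length r acc.head? acc := by
  intro r
  induction r with
  | zero =>
    intro g acc _ _ hg hacc
    simp only [List.range_zero, List.reverse_nil, List.foldl_nil, pvRowsB]
    simpa using hg
  | succ r ih =>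
    intro g acc hr hglen hg hacc
    have hr1 : r < matrix.length := by omega
    have hg0len : (pvGrid0 matrix).length = matrix.length := by simp [pvGrid0]
    have htr : ((pvGrid0 matrix).take r).length = r := by simp [hg0len]; omega
    have hgr : g.getD r [] = pvBaseRowOf (matrix.getD r []) matrix.length := by
      rw [hg, pvGetDTakeAppend _ _ _ _ (by omega : r < (pvGrid0 matrix).length)]
      rw [pvGrid0_eq, PySem.List.getD_map_range _ _ _ _ hr1]
    have hbelow : match acc.head? with
        | some bl => r < matrix.length - 1 ∧ g.getD (r+1) [] = bl
        | none => ¬ r < matrix.length - 1 := by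
      cases acc with
      | nil => simp at hacc ⊢; omega
      | cons a0 acc' =>
        simp only [List.head?_cons]
        constructor
        · simp at hacc; omega
        · rw [hg, pvGetDTakeAppendRight _ _ _ _ (by omega)]
          simp
    rw [List.range_succ, List.reverse_append, List.reverse_singleton, List.singleton_append,
        List.foldl_cons]
    have hbsfull : (pvBaseRowOf (matrix.getD r []) matrix.length).take matrix.length
        = pvBaseRowOf (matrix.getD r []) matrix.length := by
      apply List.take_of_length_le; simp [pvBaseRowOf]
    have hinner := pvInner matrix (matrix.getD r []) r rfl acc.head? matrix.length g [] none
      le_rfl (by omega) (by rw [hgr, hbsfull, List.append_nil]) (by simp) (by simp) hbelow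
    rw [hinner]
    have hsetg : g.set r (pvColsB (matrix.getD r []) acc.head? matrix.length none [])
        = (pvGrid0 matrix).take r ++
          (pvColsB (matrix.getD r []) acc.head? matrix.length none []) :: acc := by
      rw [hg, pvSetTakeAppend _ _ _ _ (by omega : r < (pvGrid0 matrix).length)]
    rw [hsetg]
    rw [ih ((pvGrid0 matrix).take r ++
          (pvColsB (matrix.getD r []) acc.head? matrix.length none []) :: acc)
        ((pvColsB (matrix.getD r []) acc.head? matrix.length none []) :: acc)
        (by omega) (by simp [htr]; omega) rfl (by simp; omega)]
    rw [pvRowsB]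
    simp only [List.head?_cons]

theorem pvAeqRowsB (matrix : List (List Int)) :
    preComputeNum matrix = pvRowsB matrix matrix.length matrix.length none [] := by
  have hlen : (pvGrid0 matrix).length = matrix.length := by
    simp [pvGrid0]
  have h := pvOuter matrix matrix.length (pvGrid0 matrix) [] le_rfl hlen
    (by rw [← hlen, List.take_length, List.append_nil]) (by simp)
  simpa [preComputeNum] using h

-- ===== the reverse-DP shape equals the spec grid =====

-- inner: pvColsB on row r produces the spec cells of columns < c in front of acc
theorem pvColsB_spec (matrix : List (List Int)) (r : Nat)
    (hrn : r < matrix.length)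
    (below : Option (List (List (String × Int))))
    (hbel : ∀ c' : Nat, c' < matrix.length →
      (match below with
       | some bl => pvDictGet (bl.getD c' []) "zeroBelow"
       | none => 0) = pvZB matrix (r+1) c') :
    ∀ (c : Nat) (rzr : Option Int) (acc : List (List (String × Int))),
    c ≤ matrix.length →
    (match rzr with | some x => x | none => 0) = pvZR matrix r c →
    pvColsB (matrix.getD r []) below c rzr acc
      = ((List.range c).map (fun c' => pvSpecCell matrix r c')) ++ acc := by
  intro c
  induction c with
  | zero => intro rzr acc _ _; simp [pvColsB]
  | succ c ih =>
    intro rzr acc hc hrzr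
    have hc1 : c < matrix.length := by omega
    have hval : (matrix.getD r []).getD c 0 = (pvRowT matrix r).getD c 0 := by
      rw [pvRowT_getD matrix r c hc1]; rfl
    have hvc : (matrix.getD r []).getD c 0 = (pvColT matrix c).getD r 0 := by
      rw [pvColT_getD matrix r c hrn]; rfl
    rw [pvColsB_succ]
    have hzr : pvZrV (matrix.getD r []) c rzr = pvZR matrix r c := by
      have hrec := pvZlist_getD (pvRowT matrix r) c (by rw [pvRowT_length]; omega)
      rw [pvZrV.eq_def, hrzr]
      simp only [pvZR]
      rw [hrec, hval]
      by_cases h1 : (pvRowT matrix r).getD c 0 = 1 <;>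
        simp only [List.getD_eq_getElem?_getD] at h1 ⊢ <;> simp [h1]
    have hzb : pvZbV (matrix.getD r []) below c = pvZB matrix r c := by
      have hrec := pvZlist_getD (pvColT matrix c) r (by rw [pvColT_length]; omega)
      rw [pvZbV.eq_def, hbel c hc1]
      simp only [pvZB]
      rw [hrec, hvc]
      by_cases h1 : (pvColT matrix c).getD r 0 = 1 <;>
        simp only [List.getD_eq_getElem?_getD] at h1 ⊢ <;> simp [h1]
    have hcell : pvCellV (matrix.getD r []) below c rzr = pvSpecCell matrix r c := by
      rw [pvCellV, hzb, hzr]; rfl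
    rw [hcell, ih (some (pvZrV (matrix.getD r []) c rzr)) (pvSpecCell matrix r c :: acc)
        (by omega) (by simpa using hzr), List.range_succ]
    simp

-- outer: pvRowsB produces the spec rows < r in front of acc
theorem pvRowsB_spec (matrix : List (List Int)) :
    ∀ (r : Nat) (below : Option (List (List (String × Int))))
      (acc : List (List (List (String × Int)))),
    r ≤ matrix.length →
    (∀ c' : Nat, c' < matrix.length →
      (match below with
       | some bl => pvDictGet (bl.getD c' []) "zeroBelow"
       | none => 0) = pvZB matrix r c') →
    pvRowsB matrix matrix.length r below acc
      = ((List.range r).map (fun r' => pvSpecRow matrix r')) ++ acc := by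
  intro r
  induction r with
  | zero => intro below acc _ _; simp [pvRowsB]
  | succ r ih =>
    intro below acc hrle hbel
    rw [pvRowsB]
    have hzrn : (match (none : Option Int) with | some x => x | none => (0:Int)) = pvZR matrix r matrix.length := by
      rw [pvZR, pvZlist_getD_len _ _ (by rw [pvRowT_length])]
    have hcells := pvColsB_spec matrix r (by omega) below hbel matrix.length none [] le_rfl hzrn
    rw [List.append_nil] at hcells
    have hcells' : pvColsB (matrix.getD r []) below matrix.length none [] = pvSpecRow matrix r := hcells
    rw [hcells', ih (some (pvSpecRow matrix r)) (pvSpecRow matrix r :: acc) (by omega)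
        (by
          intro c' hc'
          simp only []
          rw [pvSpecRow, PySem.List.getD_map_range _ _ _ _ hc', pvSpecCell, pvDictGetBelow]),
        List.range_succ]
    simp

-- ===== B's port equals the spec grid (this is where squareness is used) =====
theorem pvRow_eq (matrix : List (List Int)) (hpre : ∀ row ∈ matrix, row.length = matrix.length)
    (r : Nat) (hrn : r < matrix.length) : matrix.getD r [] = pvRowT matrix r := by
  have hlen : (matrix.getD r []).length = matrix.length := by
    rw [List.getD_eq_getElem matrix [] hrn]
    exact hpre _ (List.getElem_mem hrn)
  apply List.ext_getElem (by rw [hlen, pvRowT_length])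
  intro i h1 h2
  have hin : i < matrix.length := by rw [hlen] at h1; exact h1
  simp only [pvRowT, List.getElem_map, List.getElem_range, pvMget]
  rw [← List.getD_eq_getElem (matrix.getD r []) 0 h1]

theorem pvCol_eq (matrix : List (List Int)) (c : Nat) :
    matrix.map (fun row => row.getD c 0) = pvColT matrix c := by
  apply List.ext_getElem (by rw [List.length_map, pvColT_length])
  intro i h1 h2
  have hin : i < matrix.length := by simpa using h1
  simp only [pvColT, List.getElem_map, List.getElem_range, pvMget]
  rw [List.getD_eq_getElem matrix [] hin]

theorem pvBeqSpec (matrix : List (List Int)) (hpre : ∀ row ∈ matrix, row.length = matrix.length) :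
    preComputeNum_alt matrix = (List.range matrix.length).map (fun r => pvSpecRow matrix r) := by
  rw [preComputeNum_alt]
  apply List.map_congr_left
  intro r hr
  have hrn : r < matrix.length := by simpa using hr
  rw [pvSpecRow]
  apply List.map_congr_left
  intro c hc
  have hcn : c < matrix.length := by simpa using hc
  have hright : (matrix.map pvLineCounts).getD r [] = pvZlist (pvRowT matrix r) := by
    rw [List.getD_eq_getElem _ [] (by simpa using hrn), List.getElem_map,
        ← List.getD_eq_getElem matrix [] hrn, pvRow_eq matrix hpre r hrn, pvLineCounts_eq]
  have hbelow : (((List.range matrix.length).map (fun c =>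
      matrix.map (fun row => row.getD c 0))).map pvLineCounts).getD c []
      = pvZlist (pvColT matrix c) := by
    rw [List.map_map, PySem.List.getD_map_range _ _ _ _ hcn]
    show pvLineCounts (matrix.map fun row => row.getD c 0) = _
    rw [pvCol_eq, pvLineCounts_eq]
  rw [hright, hbelow]
  rfl

theorem pvMain (matrix : List (List Int)) (hpre : ∀ row ∈ matrix, row.length = matrix.length) :
    preComputeNum matrix = preComputeNum_alt matrix := by
  rw [pvAeqRowsB, pvBeqSpec matrix hpre,
      pvRowsB_spec matrix matrix.length none [] le_rfl
        (by intro c' hc'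
            rw [pvZB, pvZlist_getD_len _ _ (by rw [pvColT_length])])]
  exact List.append_nil _

-- ===== VERDICT (by name: the statement is the Claim_ definition above) =====
theorem preComputeNum_spec : Claim_equal_preComputeNum := by
  intro matrix _ hpre
  unfold Spec_preComputeNum
  exact pvMain matrix hpre
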